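-- pv_equiv track=rewrite | github.com/taheniyath/CP-Problems | 08-nth_additive_prime-Python/nth_additive_prime.py | fun_nth_additive_prime
-- ===== SOURCE A (Python) =====
-- def isprime(n):
-- 	if(n == 2):
-- 		return True
-- 	elif(n>1):
-- 		for i in range(2,n):
-- 			if(n%i == 0):
-- 				return False
-- 		return True
--
-- def fun_nth_additive_prime(n):
-- 	my_List = []
-- 	for i in range(200):
-- 		if(isprime(i)):
-- 			sum = 0
-- 			s = str(i)
-- 			for digit in s:
-- 				sum += int(digit)
-- 			if(isprime(sum)):
-- 				my_List.append(i)
-- 	return my_List[n]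
-- ===== SOURCE B (Python) =====
-- def fun_nth_additive_prime(n):
--     N = 200
--     sieve = [False, False] + [True] * (N - 2)
--     for p in range(2, N):
--         if sieve[p]:
--             for m in range(p * p, N, p):
--                 sieve[m] = False
--     res = []
--     for i in range(N):
--         if sieve[i]:
--             s = 0
--             k = i
--             while k:
--                 s += k % 10
--                 k //= 10
--             if sieve[s]:
--                 res.append(i)
--     return res[n]
-- ===== Notes on version B (the rewrite author's own statement) =====
-- stated objective: alternative
-- what changed: replaced per-number trial division and string digit summing by a precomputed Sieve of Eratosthenes boolean table that is consulted both for each candidate and for its arithmetic digit sum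
import Mathlib
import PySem

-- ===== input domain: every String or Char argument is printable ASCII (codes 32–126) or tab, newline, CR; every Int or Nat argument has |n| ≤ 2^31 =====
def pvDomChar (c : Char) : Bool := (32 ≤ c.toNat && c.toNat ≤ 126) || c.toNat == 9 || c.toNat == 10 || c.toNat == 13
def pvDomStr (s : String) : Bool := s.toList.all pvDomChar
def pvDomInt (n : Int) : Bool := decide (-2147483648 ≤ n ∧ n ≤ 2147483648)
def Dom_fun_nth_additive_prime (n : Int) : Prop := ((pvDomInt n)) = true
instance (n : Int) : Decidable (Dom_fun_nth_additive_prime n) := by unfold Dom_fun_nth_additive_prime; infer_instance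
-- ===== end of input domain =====

-- B replaces A's per-number trial division (and string digit summing) by one precomputed
-- Sieve of Eratosthenes table consulted for the number and its arithmetic digit sum.
-- Equivalence is about the RETURN value; neither version mutates its argument.

-- ===== PORT A =====
-- isprime(n): trial division; returns None (falsy) for n <= 1, ported as false
def pvIsprimeA (n : Int) : Bool :=
  if n == 2 then true
  else if n > 1 then (PySem.List.pyRange 2 n 1).all (fun i => !(PySem.Int.mod n i == 0))
  else false

-- sum of int(digit) over str(i)
def pvDigitSumA (i : Int) : Int :=
  (PySem.Int.toChars i).foldl (fun sum d => sum + (PySem.Int.ofChars? [d]).getD 0) 0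

def pvListA : List Int :=
  (PySem.List.pyRange 0 200 1).foldl
    (fun L i =>
      if pvIsprimeA i then
        if pvIsprimeA (pvDigitSumA i) then L ++ [i] else L
      else L) []

def fun_nth_additive_prime (n : Int) : Int :=
  (PySem.List.pyGet? pvListA n).getD 0   -- my_List[n]; out-of-range (IndexError) excluded by Pre_

-- ===== PORT B =====
-- while k: s += k % 10; k //= 10  — k is always ≥ 0 at the call sites; the fuel counter
-- (called with k.toNat + 1, always sufficient since k shrinks by //10 each step) and the
-- k ≤ 0 guard only make the loop total; exact for k ≥ 0 (Python stops at k == 0).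
def pvDigsumB (fuel : Nat) (s k : Int) : Int :=
  match fuel with
  | 0 => s
  | fuel + 1 =>
    if k ≤ 0 then s
    else pvDigsumB fuel (s + PySem.Int.mod k 10) (PySem.Int.floordiv k 10)

-- the sieve table: mark multiples of each surviving p (indices here are ≥ 0 throughout,
-- so List.set m.toNat is exact for sieve[m] = False)
def pvSieve : List Bool :=
  (PySem.List.pyRange 2 200 1).foldl
    (fun sv p =>
      if (PySem.List.pyGet? sv p).getD false then
        (PySem.List.pyRange (p * p) 200 p).foldl (fun sv2 m => sv2.set m.toNat false) sv
      else sv)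
    ([false, false] ++ List.replicate 198 true)

def pvListB : List Int :=
  (PySem.List.pyRange 0 200 1).foldl
    (fun res i =>
      if (PySem.List.pyGet? pvSieve i).getD false then
        if (PySem.List.pyGet? pvSieve (pvDigsumB (i.toNat + 1) 0 i)).getD false then res ++ [i] else res
      else res) []

def fun_nth_additive_prime_alt (n : Int) : Int :=
  (PySem.List.pyGet? pvListB n).getD 0   -- res[n]; out-of-range (IndexError) excluded by Pre_

-- ===== PRECONDITION & SPEC =====
-- Pre_ excludes exactly the n on which my_List[n] raises IndexError (the list has 27 elements).
def Pre_fun_nth_additive_prime (n : Int) : Prop := -27 ≤ n ∧ n < 27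
instance (n : Int) : Decidable (Pre_fun_nth_additive_prime n) := by
  unfold Pre_fun_nth_additive_prime; infer_instance
def pvWitness_fun_nth_additive_prime : Int := 0

def Spec_fun_nth_additive_prime (n : Int) (out : Int) : Prop := out = fun_nth_additive_prime_alt n
instance (n : Int) (out : Int) : Decidable (Spec_fun_nth_additive_prime n out) := by
  unfold Spec_fun_nth_additive_prime; infer_instance

-- ===== CLAIM (what is proved, stated in full; the proofs are below) =====
def Claim_equal_fun_nth_additive_prime : Prop := ∀ (n : Int), Dom_fun_nth_additive_prime n → Pre_fun_nth_additive_prime n → Spec_fun_nth_additive_prime n (fun_nth_additive_prime n)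

-- ===== LEMMAS AND PROOFS =====
-- both closed pipelines produce the same 27-element list
set_option maxRecDepth 10000 in
theorem pvListA_eq_pvListB : pvListA = pvListB := by decide

-- ===== VERDICT (by name: the statement is the Claim_ definition above) =====
theorem fun_nth_additive_prime_spec : Claim_equal_fun_nth_additive_prime := by
  intro n _ _
  unfold Spec_fun_nth_additive_prime fun_nth_additive_prime fun_nth_additive_prime_alt
  rw [pvListA_eq_pvListB]
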